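-- pv_equiv track=rewrite | github.com/programing-monkey/dnd-fonts | main.py | to_Abysal
-- ===== SOURCE A (Python) =====
-- def to_Abysal(text):
-- 	out = ""
-- 	a = lambda n:((n+1)&0b11111111)
-- 	e = lambda n:((n&0b00010101)<<2)|((n&0b10101000)>>2)|((n&0b01000000)<<1)|((n&0b00000010)>>1)
-- 	u = lambda n:((n+0b11111111)&0b11111111)
--
-- 	metaexprs = [[]]*256
--
-- 	for metaindex,exprs in enumerate(metaexprs):
-- 		exprs = [""]*256
-- 		exprs[metaindex] = "c" if metaindex else "z"
--
-- 		length = 1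
--
-- 		while not all(exprs):
-- 			for index,expr in enumerate(exprs):
-- 				if len(expr) == length:
-- 					candidate_a = a(index)
-- 					candidate_e = e(index)
-- 					candidate_u = u(index)
-- 					if (not exprs[candidate_a]) or (length+1 < len(exprs[candidate_a])):
-- 						exprs[candidate_a] = expr+"a"
-- 					if (not exprs[candidate_e]) or (length+1 < len(exprs[candidate_e])):
-- 						exprs[candidate_e] = expr+"e"
-- 					if (not exprs[candidate_u]) or (length+1 < len(exprs[candidate_u])):
-- 						exprs[candidate_u] = expr+"u"
-- 			length += 1
--
-- 		metaexprs[metaindex] = exprs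
--
-- 	for prev,curr in zip("\x00"+text, text+"\n"):
-- 		candidate1 = metaexprs[ord(prev)][ord(curr)]+"c"
-- 		candidate1 = candidate1[1:] if candidate1[0]=="c" else candidate1
-- 		candidate2 = metaexprs[0][ord(curr)]+"c"
-- 		out += (sorted([candidate1,candidate2],key=len)[0])+"\n"
-- 	return out
-- ===== SOURCE B (Python) =====
-- def to_Abysal(text):
-- 	# Rows built lazily by level-frontier BFS (only for sources occurring in the text),
-- 	# then the final per-(prev,curr) output pieces are precomputed once per distinct prev
-- 	# and memoized, so the main loop is a plain table lookup; output is joined once.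
-- 	def a(n): return (n + 1) & 255
-- 	def e(n): return ((n & 0b00010101) << 2) | ((n & 0b10101000) >> 2) | ((n & 0b01000000) << 1) | ((n & 0b00000010) >> 1)
-- 	def u(n): return (n + 255) & 255
--
-- 	rows = {}
--
-- 	def row(src):
-- 		if src in rows:
-- 			return rows[src]
-- 		exprs = [""] * 256
-- 		exprs[src] = "c" if src else "z"
-- 		frontier = [src]
-- 		while frontier:
-- 			nxt = []
-- 			for n in sorted(frontier):
-- 				s = exprs[n]
-- 				for t, ch in ((a(n), "a"), (e(n), "e"), (u(n), "u")):
-- 					if not exprs[t]: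
-- 						exprs[t] = s + ch
-- 						nxt.append(t)
-- 			frontier = nxt
-- 		rows[src] = exprs
-- 		return exprs
--
-- 	prows = {}
--
-- 	def prow(p):
-- 		if p in prows:
-- 			return prows[p]
-- 		r1 = row(p)
-- 		r0 = row(0)
-- 		out = []
-- 		for c in range(256):
-- 			c1 = r1[c] + "c"
-- 			if c1[0] == "c":
-- 				c1 = c1[1:]
-- 			c2 = r0[c] + "c"
-- 			out.append((c1 if len(c1) <= len(c2) else c2) + "\n")
-- 		prows[p] = out
-- 		return out
--
-- 	pieces = [prow(ord(prev))[ord(curr)] for prev, curr in zip("\x00" + text, text + "\n")]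
-- 	return "".join(pieces)
-- ===== Notes on version B (the rewrite author's own statement) =====
-- stated objective: faster
-- what changed: B replaces A's per-length full 256-entry rescans with a level-frontier BFS, builds only the rows needed for the text's distinct characters (memoized) instead of all 256 rows up front, precomputes the per-(prev,curr) output pieces once per distinct prev so the main loop is a table lookup, and joins the output once instead of repeated string concatenation.
import Mathlib
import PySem

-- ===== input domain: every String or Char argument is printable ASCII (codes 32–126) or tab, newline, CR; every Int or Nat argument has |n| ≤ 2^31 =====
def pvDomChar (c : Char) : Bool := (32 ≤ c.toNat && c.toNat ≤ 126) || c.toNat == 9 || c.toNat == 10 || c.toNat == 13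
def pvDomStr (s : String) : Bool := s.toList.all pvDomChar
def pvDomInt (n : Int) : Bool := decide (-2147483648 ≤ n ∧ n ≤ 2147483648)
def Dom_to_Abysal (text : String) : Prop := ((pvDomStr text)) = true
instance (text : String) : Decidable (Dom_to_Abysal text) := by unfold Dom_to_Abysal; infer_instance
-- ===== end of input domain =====

-- B builds transform rows lazily (only for sources in the text) with a level-frontier BFS
-- instead of A's 256 rows of repeated full 256-entry rescans, precomputes the per-(prev,curr)
-- output pieces once per distinct prev, and joins the output once (measured faster).

-- ===== PORT A =====
-- Python strings of the algorithm are carried as List Char (PySem's recommended list side);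
-- the result is packed with String.ofList at the end.
def pvA_a (n : Nat) : Nat := (n + 1) &&& 255
def pvA_e (n : Nat) : Nat :=
  ((n &&& 0b00010101) <<< 2) ||| ((n &&& 0b10101000) >>> 2) |||
  ((n &&& 0b01000000) <<< 1) ||| ((n &&& 0b00000010) >>> 1)
def pvA_u (n : Nat) : Nat := (n + 0b11111111) &&& 255

-- `if (not exprs[c]) or (length+1 < len(exprs[c])): exprs[c] = v`
def pvA_upd (length : Nat) (exprs : List (List Char)) (k : Nat) (v : List Char) : List (List Char) :=
  if exprs.getD k [] = [] ∨ length + 1 < (exprs.getD k []).length then exprs.set k v else exprs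

-- one index of the `for index,expr in enumerate(exprs)` scan
def pvA_step (length : Nat) (exprs : List (List Char)) (index : Nat) : List (List Char) :=
  let expr := exprs.getD index []
  if expr.length = length then
    let e1 := pvA_upd length exprs (pvA_a index) (expr ++ ['a'])
    let e2 := pvA_upd length e1 (pvA_e index) (expr ++ ['e'])
    pvA_upd length e2 (pvA_u index) (expr ++ ['u'])
  else exprs

def pvA_pass (exprs : List (List Char)) (length : Nat) : List (List Char) :=
  (List.range 256).foldl (pvA_step length) exprs

-- `while not all(exprs): … ; length += 1` — fuel 256 bounds the loop (each productive pass
-- fills at least one of the 256 entries; the Python loop ends within that many passes)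
def pvA_loop : Nat → List (List Char) → Nat → List (List Char)
  | 0, exprs, _ => exprs
  | fuel + 1, exprs, length =>
      if exprs.all (fun s => !s.isEmpty) then exprs
      else pvA_loop fuel (pvA_pass exprs length) (length + 1)

def pvA_row (metaindex : Nat) : List (List Char) :=
  let exprs := (List.replicate 256 ([] : List Char)).set metaindex
      (if metaindex ≠ 0 then ['c'] else ['z'])
  pvA_loop 256 exprs 1

def to_Abysal (text : String) : String :=
  let metaexprs := (List.range 256).map pvA_row
  let prevs := '\x00' :: text.toList          -- "\x00" + text
  let currs := text.toList ++ ['\n']          -- text + "\n"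
  let out := (prevs.zip currs).foldl (fun out pc =>
    let candidate1 := ((metaexprs.getD pc.1.toNat []).getD pc.2.toNat []) ++ ['c']
    -- candidate1[0] is always in range: candidate1 ends with 'c', hence is nonempty
    let candidate1 := if PySem.List.pyGet? candidate1 0 = some 'c'
                      then PySem.List.slice candidate1 (some 1) none else candidate1
    let candidate2 := ((metaexprs.getD 0 []).getD pc.2.toNat []) ++ ['c']
    out ++ (PySem.List.sorted [candidate1, candidate2] (fun s => s.length) false).headD [] ++ ['\n'])
    []
  String.ofList out

-- ===== PORT B =====
def pvB_a (n : Nat) : Nat := (n + 1) &&& 255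
def pvB_e (n : Nat) : Nat :=
  ((n &&& 0b00010101) <<< 2) ||| ((n &&& 0b10101000) >>> 2) |||
  ((n &&& 0b01000000) <<< 1) ||| ((n &&& 0b00000010) >>> 1)
def pvB_u (n : Nat) : Nat := (n + 255) &&& 255

-- body of `for n in sorted(frontier): s = exprs[n]; for t,ch in …`
def pvB_visit (st : List (List Char) × List Nat) (n : Nat) : List (List Char) × List Nat :=
  let s := st.1.getD n []
  [(pvB_a n, 'a'), (pvB_e n, 'e'), (pvB_u n, 'u')].foldl
    (fun st2 tc =>
      if st2.1.getD tc.1 [] = [] then (st2.1.set tc.1 (s ++ [tc.2]), st2.2 ++ [tc.1]) else st2)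
    st

def pvB_pass (exprs : List (List Char)) (frontier : List Nat) : List (List Char) × List Nat :=
  (PySem.List.sorted frontier (fun x => x) false).foldl pvB_visit (exprs, [])

-- `while frontier:` — fuel 256 bounds the loop (one level per iteration)
def pvB_bfs : Nat → List (List Char) → List Nat → List (List Char)
  | 0, exprs, _ => exprs
  | fuel + 1, exprs, frontier =>
      match frontier with
      | [] => exprs
      | _ => let st := pvB_pass exprs frontier
             pvB_bfs fuel st.1 st.2

def pvB_row (src : Nat) : List (List Char) :=
  pvB_bfs 256 ((List.replicate 256 ([] : List Char)).set src
      (if src ≠ 0 then ['c'] else ['z'])) [src]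

-- `if src in rows: return rows[src] … rows[src] = exprs`
def pvB_getRow (rows : PySem.Dict Nat (List (List Char))) (src : Nat) :
    PySem.Dict Nat (List (List Char)) × List (List Char) :=
  match rows.get? src with
  | some r => (rows, r)
  | none => let r := pvB_row src; (rows.insert src r, r)

def pvB_prowBuild (r1 r0 : List (List Char)) : List (List Char) :=
  (List.range 256).foldl (fun out c =>
    let c1 := r1.getD c [] ++ ['c']
    let c1 := if PySem.List.pyGet? c1 0 = some 'c'
              then PySem.List.slice c1 (some 1) none else c1
    let c2 := r0.getD c [] ++ ['c']
    out ++ [(if c1.length ≤ c2.length then c1 else c2) ++ ['\n']]) []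

-- `if p in prows: return prows[p] … prows[p] = out`
def pvB_prow (rows prows : PySem.Dict Nat (List (List Char))) (p : Nat) :
    PySem.Dict Nat (List (List Char)) × PySem.Dict Nat (List (List Char)) × List (List Char) :=
  match prows.get? p with
  | some r => (rows, prows, r)
  | none =>
    let q1 := pvB_getRow rows p
    let q0 := pvB_getRow q1.1 0
    let out := pvB_prowBuild q1.2 q0.2
    (q0.1, prows.insert p out, out)

def to_Abysal_alt (text : String) : String :=
  let prevs := '\x00' :: text.toList
  let currs := text.toList ++ ['\n']
  let st := (prevs.zip currs).foldl (fun st pc =>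
    let q := pvB_prow st.1 st.2.1 pc.1.toNat
    -- prow(ord(prev))[ord(curr)]: the index is always in range on the admitted domain
    (q.1, q.2.1, st.2.2 ++ [q.2.2.getD pc.2.toNat []]))
    (PySem.Dict.empty, PySem.Dict.empty, ([] : List (List Char)))
  String.ofList (PySem.Chars.join [] st.2.2)

-- ===== PRECONDITION & SPEC =====
def Spec_to_Abysal (text : String) (out : String) : Prop := out = to_Abysal_alt text
instance (text : String) (out : String) : Decidable (Spec_to_Abysal text out) := by unfold Spec_to_Abysal; infer_instance

-- ===== CLAIM (what is proved, stated in full; the proofs are below) =====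
def Claim_equal_to_Abysal : Prop := ∀ (text : String), Dom_to_Abysal text → Spec_to_Abysal text (to_Abysal text)

-- ===== LEMMAS AND PROOFS =====

-- ---------- small getD/set helpers ----------

theorem pv_getD_set_self (l : List (List Char)) (i : Nat) (v : List Char) (h : i < l.length) :
    (l.set i v).getD i [] = v := by
  simp [List.getD_eq_getElem?_getD, List.getElem?_set_self h]

theorem pv_getD_set_ne (l : List (List Char)) (i j : Nat) (v : List Char) (h : i ≠ j) :
    (l.set i v).getD j [] = l.getD j [] := by
  simp [List.getD_eq_getElem?_getD, List.getElem?_set_ne h]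

theorem pv_getD_big (ex : List (List Char)) (h : ex.length = 256) (i : Nat) (hi : ¬ i < 256) :
    ex.getD i [] = [] := by
  rw [List.getD_eq_getElem?_getD, List.getElem?_eq_none (by omega)]; rfl

theorem pv_getD_rep (i : Nat) : (List.replicate 256 ([] : List Char)).getD i [] = [] := by
  by_cases h : i < 256
  · exact List.getD_replicate _ h
  · exact pv_getD_big _ (List.length_replicate) i h

-- ---------- bounds of the three step functions ----------

theorem pv_a_lt (n : Nat) : pvA_a n < 256 := lt_of_le_of_lt Nat.and_le_right (by norm_num)

theorem pv_u_lt (n : Nat) : pvA_u n < 256 := lt_of_le_of_lt Nat.and_le_right (by norm_num)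

theorem pv_e_lt (n : Nat) : pvA_e n < 256 := by
  unfold pvA_e
  have hA : (n &&& 21) <<< 2 < 2^8 := by
    have h := Nat.and_le_right (n := n) (m := 21); rw [Nat.shiftLeft_eq]; norm_num; omega
  have hB : (n &&& 168) >>> 2 < 2^8 :=
    lt_of_le_of_lt (le_trans (Nat.shiftRight_le _ _) (Nat.and_le_right)) (by norm_num)
  have hC : (n &&& 64) <<< 1 < 2^8 := by
    have h := Nat.and_le_right (n := n) (m := 64); rw [Nat.shiftLeft_eq]; norm_num; omega
  have hD : (n &&& 2) >>> 1 < 2^8 :=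
    lt_of_le_of_lt (le_trans (Nat.shiftRight_le _ _) (Nat.and_le_right)) (by norm_num)
  have := Nat.or_lt_two_pow (Nat.or_lt_two_pow (Nat.or_lt_two_pow hA hB) hC) hD
  norm_num at this; omega

-- ---------- the pass invariants ----------

-- state of the table mid-pass, relative to the pass-start table `orig`
def pvW (orig : List (List Char)) (L : Nat) (ex : List (List Char)) : Prop :=
  ex.length = 256 ∧ ∀ i : Nat,
    (orig.getD i [] ≠ [] → ex.getD i [] = orig.getD i []) ∧
    (orig.getD i [] = [] → ex.getD i [] = [] ∨ (ex.getD i []).length = L + 1)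

-- state between passes: fr is exactly the current BFS level
def pvInv (ex : List (List Char)) (L : Nat) (fr : List Nat) : Prop :=
  ex.length = 256 ∧ 1 ≤ L ∧ fr.Nodup ∧
  (∀ i : Nat, i ∈ fr ↔ i < 256 ∧ (ex.getD i []).length = L) ∧
  (∀ i : Nat, (ex.getD i []).length ≤ L)

theorem pv_w_refl (orig : List (List Char)) (L : Nat) (h : orig.length = 256) :
    pvW orig L orig :=
  ⟨h, fun _ => ⟨fun _ => rfl, fun h0 => Or.inl h0⟩⟩

-- unguarded body of A's relaxation at one index
def pvAStep (L : Nat) (s : List Char) (e : List (List Char)) (tc : Nat × Char) : List (List Char) :=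
  pvA_upd L e tc.1 (s ++ [tc.2])

def pvA_body (L : Nat) (ex : List (List Char)) (i : Nat) : List (List Char) :=
  [(pvA_a i, 'a'), (pvA_e i, 'e'), (pvA_u i, 'u')].foldl (pvAStep L (ex.getD i [])) ex

def pvBStep (s : List Char) (st2 : List (List Char) × List Nat) (tc : Nat × Char) :
    List (List Char) × List Nat :=
  if st2.1.getD tc.1 [] = [] then (st2.1.set tc.1 (s ++ [tc.2]), st2.2 ++ [tc.1]) else st2

theorem pvA_step_eq (L : Nat) (ex : List (List Char)) (i : Nat) :
    pvA_step L ex i = if (ex.getD i []).length = L then pvA_body L ex i else ex := rfl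

-- ---------- one visit: A's three guarded writes = B's three frontier writes ----------

theorem pv_fold_pairs (orig : List (List Char)) (L : Nat)
    (hle : ∀ i, (orig.getD i []).length ≤ L) (s : List Char) (hs : s.length = L) :
    ∀ (ps : List (Nat × Char)), (∀ p ∈ ps, p.1 < 256) →
    ∀ ex nxt, pvW orig L ex → nxt.Nodup → (∀ j ∈ nxt, ex.getD j [] ≠ [] ∧ j < 256) →
    ps.foldl (pvAStep L s) ex = (ps.foldl (pvBStep s) (ex, nxt)).1 ∧
    pvW orig L (ps.foldl (pvBStep s) (ex, nxt)).1 ∧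
    (ps.foldl (pvBStep s) (ex, nxt)).2.Nodup ∧
    (∀ j ∈ (ps.foldl (pvBStep s) (ex, nxt)).2,
      (ps.foldl (pvBStep s) (ex, nxt)).1.getD j [] ≠ [] ∧ j < 256) ∧
    (∀ j, ex.getD j [] ≠ [] →
      (ps.foldl (pvBStep s) (ex, nxt)).1.getD j [] = ex.getD j []) ∧
    (∀ j, j ∈ (ps.foldl (pvBStep s) (ex, nxt)).2 ↔
      j ∈ nxt ∨ (ex.getD j [] = [] ∧ (ps.foldl (pvBStep s) (ex, nxt)).1.getD j [] ≠ [])) := by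
  intro ps
  induction ps with
  | nil =>
    intro _ ex nxt hW hnd hne
    refine ⟨rfl, hW, hnd, fun j hj => hne j hj, fun j _ => rfl, fun j => ?_⟩
    simp only [List.foldl_nil]
    exact ⟨fun h => Or.inl h, fun h => by
      rcases h with h | ⟨h1, h2⟩
      · exact h
      · exact absurd h1 h2⟩
  | cons p ps ih =>
    intro hps ex nxt hW hnd hne
    obtain ⟨hlen, hWe⟩ := hW
    have hp : p.1 < 256 := hps p (List.mem_cons_self)
    by_cases hemp : ex.getD p.1 [] = []
    · -- a write happens on both sides
      have horig : orig.getD p.1 [] = [] := by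
        by_contra h
        exact h (((hWe p.1).1 h).symm.trans hemp)
      have hA1 : pvAStep L s ex p = ex.set p.1 (s ++ [p.2]) := by
        unfold pvAStep pvA_upd
        rw [if_pos (Or.inl hemp)]
      have hB1 : pvBStep s (ex, nxt) p = (ex.set p.1 (s ++ [p.2]), nxt ++ [p.1]) := by
        unfold pvBStep
        rw [if_pos hemp]
      set ex' := ex.set p.1 (s ++ [p.2]) with hex'
      have hget : ∀ j, ex'.getD j [] = if j = p.1 then s ++ [p.2] else ex.getD j [] := by
        intro j
        by_cases hj : j = p.1
        · rw [if_pos hj, hex', hj]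
          exact pv_getD_set_self ex p.1 _ (by omega)
        · rw [if_neg hj, hex', pv_getD_set_ne ex p.1 j _ (fun h => hj h.symm)]
      have hW' : pvW orig L ex' := by
        refine ⟨by rw [hex', List.length_set]; exact hlen, fun i => ⟨fun h1 => ?_, fun h2 => ?_⟩⟩
        · rw [hget i]
          by_cases hi : i = p.1
          · exact absurd (hi ▸ h1) (fun hh => hh horig)
          · rw [if_neg hi]; exact (hWe i).1 h1
        · rw [hget i]
          by_cases hi : i = p.1
          · rw [if_pos hi]; right; simp [hs]
          · rw [if_neg hi]; exact (hWe i).2 h2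
      have hsne : s ++ [p.2] ≠ [] := by simp
      have hnd' : (nxt ++ [p.1]).Nodup := by
        rw [List.nodup_append]
        refine ⟨hnd, List.nodup_singleton _, fun a ha b hb => ?_⟩
        rw [List.mem_singleton] at hb
        intro hEq
        exact (hne a ha).1 (by rw [hEq, hb]; exact hemp)
      have hne' : ∀ j ∈ nxt ++ [p.1], ex'.getD j [] ≠ [] ∧ j < 256 := by
        intro j hj
        rcases List.mem_append.1 hj with hj | hj
        · refine ⟨?_, (hne j hj).2⟩
          rw [hget j]
          by_cases hji : j = p.1
          · rw [if_pos hji]; exact hsne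
          · rw [if_neg hji]; exact (hne j hj).1
        · simp only [List.mem_singleton] at hj; subst hj
          refine ⟨?_, hp⟩
          rw [hget p.1, if_pos rfl]; exact hsne
      obtain ⟨c1, c2, c3, c4, c5, c6⟩ :=
        ih (fun q hq => hps q (List.mem_cons_of_mem _ hq)) ex' (nxt ++ [p.1]) hW' hnd' hne'
      simp only [List.foldl_cons, hA1, hB1]
      refine ⟨c1, c2, c3, c4, fun j hj => ?_, fun j => ?_⟩
      · have hjne : j ≠ p.1 := fun hEq => hj (hEq ▸ hemp)
        have hj' : ex'.getD j [] = ex.getD j [] := by rw [hget j, if_neg hjne]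
        rw [c5 j (hj' ▸ hj), hj']
      · rw [c6 j]
        constructor
        · rintro (hj | ⟨he', hf⟩)
          · rcases List.mem_append.1 hj with hj | hj
            · exact Or.inl hj
            · simp only [List.mem_singleton] at hj; subst hj
              refine Or.inr ⟨hemp, ?_⟩
              have h1 : ex'.getD p.1 [] ≠ [] := by rw [hget p.1, if_pos rfl]; exact hsne
              rw [c5 p.1 h1]; exact h1
          · refine Or.inr ⟨?_, hf⟩
            by_cases hjp : j = p.1
            · exact hjp ▸ hemp
            · have : ex'.getD j [] = ex.getD j [] := by rw [hget j, if_neg hjp]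
              exact this ▸ he'
        · rintro (hj | ⟨he, hf⟩)
          · exact Or.inl (List.mem_append.2 (Or.inl hj))
          · by_cases hjp : j = p.1
            · subst hjp; exact Or.inl (List.mem_append.2 (Or.inr (List.mem_singleton.2 rfl)))
            · refine Or.inr ⟨?_, hf⟩
              rw [hget j, if_neg hjp]; exact he
    · -- no write on either side
      have hA1 : pvAStep L s ex p = ex := by
        unfold pvAStep pvA_upd
        have h2 : ¬ (L + 1 < (ex.getD p.1 []).length) := by
          rcases (hWe p.1) with ⟨w1, w2⟩
          by_cases ho : orig.getD p.1 [] = []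
          · rcases w2 ho with h | h
            · exact absurd h hemp
            · omega
          · rw [w1 ho]
            have := hle p.1; omega
        rw [if_neg (not_or.mpr ⟨hemp, by omega⟩)]
      have hB1 : pvBStep s (ex, nxt) p = (ex, nxt) := by
        unfold pvBStep
        rw [if_neg hemp]
      simp only [List.foldl_cons, hA1, hB1]
      exact ih (fun q hq => hps q (List.mem_cons_of_mem _ hq)) ex nxt ⟨hlen, hWe⟩ hnd hne

-- ---------- A's guarded scan over all indices = unguarded scan over the level ----------

theorem pv_A_filter (orig : List (List Char)) (L : Nat) (hL : 1 ≤ L)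
    (hle : ∀ i, (orig.getD i []).length ≤ L) :
    ∀ (l : List Nat), ∀ ex, pvW orig L ex →
    l.foldl (pvA_step L) ex =
      (l.filter (fun i => (orig.getD i []).length == L)).foldl (pvA_body L) ex := by
  intro l
  induction l with
  | nil => intro ex _; rfl
  | cons i l ih =>
    intro ex hW
    by_cases hg : (orig.getD i []).length = L
    · have ho : orig.getD i [] ≠ [] := by
        intro h; rw [h] at hg; simp at hg; omega
      have hex : ex.getD i [] = orig.getD i [] := (hW.2 i).1 ho
      have hcur : (ex.getD i []).length = L := by rw [hex]; exact hg
      have hstep : pvA_step L ex i = pvA_body L ex i := by rw [pvA_step_eq, if_pos hcur]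
      have hfil : (i :: l).filter (fun i => (orig.getD i []).length == L)
          = i :: l.filter (fun i => (orig.getD i []).length == L) := by
        have hb : ((orig.getD i []).length == L) = true := beq_iff_eq.mpr hg
        simp only [List.filter_cons, hb]
        simp
      obtain ⟨c1, c2, _, _, _, _⟩ := pv_fold_pairs orig L hle (ex.getD i []) hcur
        [(pvA_a i, 'a'), (pvA_e i, 'e'), (pvA_u i, 'u')]
        (by
          intro p hp
          simp only [List.mem_cons, List.not_mem_nil, or_false] at hp
          rcases hp with h | h | h
          · rw [h]; exact pv_a_lt i
          · rw [h]; exact pv_e_lt i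
          · rw [h]; exact pv_u_lt i)
        ex [] hW List.nodup_nil (by simp)
      rw [List.foldl_cons, hstep, hfil, List.foldl_cons]
      exact ih (pvA_body L ex i) (by rw [show pvA_body L ex i = _ from c1]; exact c2)
    · have hcur : ¬ (ex.getD i []).length = L := by
        rcases (hW.2 i) with ⟨w1, w2⟩
        by_cases ho : orig.getD i [] = []
        · rcases w2 ho with h | h
          · rw [h]; simpa using (by omega : ¬ (0 = L))
          · rw [h]; omega
        · rw [w1 ho]; exact hg
      have hfil : (i :: l).filter (fun i => (orig.getD i []).length == L)
          = l.filter (fun i => (orig.getD i []).length == L) := by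
        have hb : ((orig.getD i []).length == L) = false := by
          simpa using hg
        simp only [List.filter_cons, hb]
        simp
      rw [List.foldl_cons, pvA_step_eq, if_neg hcur, hfil]
      exact ih ex hW

-- ---------- processing one whole level: A's body scan = B's frontier visit fold ----------

theorem pv_grand (orig : List (List Char)) (L : Nat) (hL : 1 ≤ L)
    (hle : ∀ i, (orig.getD i []).length ≤ L) :
    ∀ (l : List Nat), (∀ i ∈ l, (orig.getD i []).length = L) →
    ∀ ex nxt, pvW orig L ex → nxt.Nodup → (∀ j ∈ nxt, ex.getD j [] ≠ [] ∧ j < 256) →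
    l.foldl (pvA_body L) ex = (l.foldl pvB_visit (ex, nxt)).1 ∧
    pvW orig L (l.foldl pvB_visit (ex, nxt)).1 ∧
    (l.foldl pvB_visit (ex, nxt)).2.Nodup ∧
    (∀ j ∈ (l.foldl pvB_visit (ex, nxt)).2,
      (l.foldl pvB_visit (ex, nxt)).1.getD j [] ≠ [] ∧ j < 256) ∧
    (∀ j, ex.getD j [] ≠ [] →
      (l.foldl pvB_visit (ex, nxt)).1.getD j [] = ex.getD j []) ∧
    (∀ j, j ∈ (l.foldl pvB_visit (ex, nxt)).2 ↔
      j ∈ nxt ∨ (ex.getD j [] = [] ∧ (l.foldl pvB_visit (ex, nxt)).1.getD j [] ≠ [])) := by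
  intro l
  induction l with
  | nil =>
    intro _ ex nxt hW hnd hne
    refine ⟨rfl, hW, hnd, fun j hj => hne j hj, fun j _ => rfl, fun j => ?_⟩
    simp only [List.foldl_nil]
    exact ⟨fun h => Or.inl h, fun h => by
      rcases h with h | ⟨h1, h2⟩
      · exact h
      · exact absurd h1 h2⟩
  | cons i l ih =>
    intro hl ex nxt hW hnd hne
    have hg : (orig.getD i []).length = L := hl i List.mem_cons_self
    have ho : orig.getD i [] ≠ [] := by intro h; rw [h] at hg; simp at hg; omega
    have hex : ex.getD i [] = orig.getD i [] := (hW.2 i).1 ho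
    have hs : (ex.getD i []).length = L := by rw [hex]; exact hg
    have hvisit : pvB_visit (ex, nxt) i =
        [(pvB_a i, 'a'), (pvB_e i, 'e'), (pvB_u i, 'u')].foldl (pvBStep (ex.getD i [])) (ex, nxt) := rfl
    obtain ⟨c1, c2, c3, c4, c5, c6⟩ := pv_fold_pairs orig L hle (ex.getD i []) hs
      [(pvB_a i, 'a'), (pvB_e i, 'e'), (pvB_u i, 'u')]
      (by
        intro p hp
        simp only [List.mem_cons, List.not_mem_nil, or_false] at hp
        rcases hp with h | h | h
        · rw [h]; exact pv_a_lt i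
        · rw [h]; exact pv_e_lt i
        · rw [h]; exact pv_u_lt i)
      ex nxt hW hnd hne
    set st1 := [(pvB_a i, 'a'), (pvB_e i, 'e'), (pvB_u i, 'u')].foldl (pvBStep (ex.getD i [])) (ex, nxt) with hst1
    obtain ⟨d1, d2, d3, d4, d5, d6⟩ := ih (fun j hj => hl j (List.mem_cons_of_mem _ hj)) st1.1 st1.2 c2 c3 c4
    have hbody : pvA_body L ex i = st1.1 := c1
    rw [List.foldl_cons, List.foldl_cons, hvisit, hbody]
    refine ⟨d1, d2, d3, d4, fun j hj => ?_, fun j => ?_⟩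
    · have h1 : st1.1.getD j [] = ex.getD j [] := c5 j hj
      rw [d5 j (h1 ▸ hj), h1]
    · rw [d6 j]
      constructor
      · rintro (hj | ⟨he1, hf⟩)
        · rcases (c6 j).1 hj with hj' | ⟨he, hf'⟩
          · exact Or.inl hj'
          · refine Or.inr ⟨he, ?_⟩
            rw [d5 j hf']; exact hf'
        · refine Or.inr ⟨?_, hf⟩
          by_contra hne0
          exact hne0 ((c5 j hne0).symm.trans he1)
      · rintro (hj | ⟨he, hf⟩)
        · exact Or.inl ((c6 j).2 (Or.inl hj))
        · by_cases h1 : st1.1.getD j [] = []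
          · exact Or.inr ⟨h1, hf⟩
          · exact Or.inl ((c6 j).2 (Or.inr ⟨he, h1⟩))

-- ---------- one pass: A's full rescan = B's sorted-frontier pass ----------

theorem pv_pass (ex : List (List Char)) (L : Nat) (fr : List Nat) (hInv : pvInv ex L fr) :
    pvA_pass ex L = (pvB_pass ex fr).1 ∧ pvInv (pvB_pass ex fr).1 (L + 1) (pvB_pass ex fr).2 := by
  obtain ⟨hlen, hL, hnd, hmem, hle⟩ := hInv
  set F := (List.range 256).filter (fun i => (ex.getD i []).length == L) with hF
  have hmemF : ∀ i, i ∈ F ↔ i < 256 ∧ (ex.getD i []).length = L := by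
    intro i; rw [hF, List.mem_filter, List.mem_range]; simp
  have hFP : F.Pairwise (· < ·) := List.Pairwise.filter _ List.pairwise_lt_range
  have hFnd : F.Nodup := List.Nodup.filter _ List.nodup_range
  have hperm : F.Perm fr := (List.perm_ext_iff_of_nodup hFnd hnd).2
    (fun a => by rw [hmemF a, hmem a])
  have hsorted : PySem.List.sorted fr (fun x => x) false = F :=
    PySem.List.sorted_eq_of_perm_of_pairwise_lt fr F (fun x => x) hperm hFP
  have hW0 : pvW ex L ex := pv_w_refl ex L hlen
  obtain ⟨c1, c2, c3, c4, c5, c6⟩ := pv_grand ex L hL hle F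
    (fun i hi => ((hmemF i).1 hi).2) ex [] hW0 List.nodup_nil (by simp)
  have hA : pvA_pass ex L = F.foldl (pvA_body L) ex := by
    unfold pvA_pass
    exact pv_A_filter ex L hL hle (List.range 256) ex hW0
  have hB : pvB_pass ex fr = F.foldl pvB_visit (ex, []) := by
    unfold pvB_pass; rw [hsorted]
  refine ⟨by rw [hA, hB]; exact c1, ?_⟩
  rw [hB]
  refine ⟨c2.1, by omega, c3, fun i => ?_, fun i => ?_⟩
  · constructor
    · intro hi
      rcases (c6 i).1 hi with hj | ⟨hei, hfi⟩
      · cases hj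
      · refine ⟨(c4 i hi).2, ?_⟩
        rcases (c2.2 i).2 hei with h | h
        · exact absurd h hfi
        · exact h
    · rintro ⟨hi256, hleni⟩
      have hfi : (F.foldl pvB_visit (ex, [])).1.getD i [] ≠ [] := by
        intro h; rw [h] at hleni; simp at hleni
      have hei : ex.getD i [] = [] := by
        by_contra h
        rw [c5 i h] at hleni
        have := hle i; omega
      exact (c6 i).2 (Or.inr ⟨hei, hfi⟩)
  · rcases (c2.2 i) with ⟨w1, w2⟩
    by_cases h : ex.getD i [] = []
    · rcases w2 h with h1 | h1
      · rw [h1]; simp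
      · omega
    · rw [w1 h]; have := hle i; omega

-- ---------- termination bookkeeping ----------

theorem pv_allfull (ex : List (List Char)) (hlen : ex.length = 256) :
    ex.all (fun s => !s.isEmpty) = true ↔ ∀ i, i < 256 → ex.getD i [] ≠ [] := by
  rw [List.all_eq_true]
  constructor
  · intro h i hi
    have hmem : ex.getD i [] ∈ ex := by
      rw [List.getD_eq_getElem ex [] (by omega)]; exact List.getElem_mem _
    have := h _ hmem; simpa using this
  · intro h x hx
    obtain ⟨i, hi, hxi⟩ := List.mem_iff_getElem.1 hx
    have h2 := h i (by omega)
    rw [List.getD_eq_getElem ex [] hi, hxi] at h2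
    simpa using h2

theorem pv_visit_fold_id (ex : List (List Char))
    (hfull : ∀ i, i < 256 → ex.getD i [] ≠ []) :
    ∀ (l : List Nat) (nxt : List Nat), l.foldl pvB_visit (ex, nxt) = (ex, nxt) := by
  intro l
  induction l with
  | nil => intro nxt; rfl
  | cons n l ih =>
    intro nxt
    rw [List.foldl_cons]
    have hta : pvB_a n < 256 := pv_a_lt n
    have hte : pvB_e n < 256 := pv_e_lt n
    have htu : pvB_u n < 256 := pv_u_lt n
    have estep : ∀ t ch, t < 256 → pvBStep (ex.getD n []) (ex, nxt) (t, ch) = (ex, nxt) := by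
      intro t ch ht
      unfold pvBStep
      rw [if_neg (hfull t ht)]
    have h1 : pvB_visit (ex, nxt) n = (ex, nxt) := by
      show [(pvB_a n, 'a'), (pvB_e n, 'e'), (pvB_u n, 'u')].foldl (pvBStep (ex.getD n [])) (ex, nxt)
        = (ex, nxt)
      simp only [List.foldl_cons, List.foldl_nil]
      rw [estep _ _ hta, estep _ _ hte, estep _ _ htu]
    rw [h1]; exact ih nxt

theorem pv_bfs_nil : ∀ (fuel : Nat) (ex : List (List Char)), pvB_bfs fuel ex [] = ex := by
  intro fuel ex
  cases fuel <;> rfl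

theorem pv_pass_id (ex : List (List Char)) (L : Nat) (hlen : ex.length = 256) (hL : 1 ≤ L)
    (hno : ∀ i, i < 256 → (ex.getD i []).length ≠ L)
    (hle : ∀ i, (ex.getD i []).length ≤ L) :
    pvA_pass ex L = ex := by
  unfold pvA_pass
  rw [pv_A_filter ex L hL hle (List.range 256) ex (pv_w_refl ex L hlen)]
  have hnil : (List.range 256).filter (fun i => (ex.getD i []).length == L) = [] := by
    rw [List.filter_eq_nil_iff]
    intro a ha; rw [List.mem_range] at ha; simpa using hno a ha
  rw [hnil]
  rfl

theorem pv_frozen : ∀ (fuel : Nat) (ex : List (List Char)) (L : Nat), ex.length = 256 → 1 ≤ L →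
    (∀ i, (ex.getD i []).length < L) → pvA_loop fuel ex L = ex := by
  intro fuel
  induction fuel with
  | zero => intro ex L _ _ _; rfl
  | succ fuel ih =>
    intro ex L hlen hL hlt
    simp only [pvA_loop]
    by_cases hfull : ex.all (fun s => !s.isEmpty) = true
    · rw [if_pos hfull]
    · rw [if_neg hfull,
        pv_pass_id ex L hlen hL (fun i _ => by have := hlt i; omega) (fun i => by have := hlt i; omega)]
      exact ih ex (L + 1) hlen (by omega) (fun i => by have := hlt i; omega)

-- ---------- the two level loops agree ----------

theorem pv_loop_eq : ∀ (fuel : Nat) (ex : List (List Char)) (L : Nat) (fr : List Nat),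
    pvInv ex L fr → pvA_loop fuel ex L = pvB_bfs fuel ex fr := by
  intro fuel
  induction fuel with
  | zero => intro ex L fr _; rfl
  | succ fuel ih =>
    intro ex L fr hInv
    obtain ⟨hlen, hL, hnd, hmem, hle⟩ := hInv
    by_cases hfull : ex.all (fun s => !s.isEmpty) = true
    · have hA : pvA_loop (fuel + 1) ex L = ex := by
        simp only [pvA_loop]; rw [if_pos hfull]
      rw [hA]
      have hfull' := (pv_allfull ex hlen).1 hfull
      cases fr with
      | nil => rw [pv_bfs_nil]
      | cons hd tl =>
        have hp : pvB_pass ex (hd :: tl) = (ex, []) := by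
          unfold pvB_pass
          exact pv_visit_fold_id ex hfull' _ []
        simp only [pvB_bfs]
        rw [hp, pv_bfs_nil]
    · have hA : pvA_loop (fuel + 1) ex L = pvA_loop fuel (pvA_pass ex L) (L + 1) := by
        simp only [pvA_loop]; rw [if_neg hfull]
      rw [hA]
      cases fr with
      | nil =>
        rw [pv_bfs_nil]
        have hno : ∀ i, i < 256 → (ex.getD i []).length ≠ L := by
          intro i hi hEq
          exact absurd ((hmem i).2 ⟨hi, hEq⟩) (List.not_mem_nil)
        rw [pv_pass_id ex L hlen hL hno hle]
        exact pv_frozen fuel ex (L + 1) hlen (by omega) (fun i => by have := hle i; omega)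
      | cons hd tl =>
        obtain ⟨heq, hInv'⟩ := pv_pass ex L (hd :: tl) ⟨hlen, hL, hnd, hmem, hle⟩
        simp only [pvB_bfs]
        rw [heq]
        exact ih (pvB_pass ex (hd :: tl)).1 (L + 1) (pvB_pass ex (hd :: tl)).2 hInv'

theorem pv_row_eq (m : Nat) (hm : m < 256) : pvA_row m = pvB_row m := by
  unfold pvA_row pvB_row
  apply pv_loop_eq
  set c := (if m ≠ 0 then ['c'] else ['z']) with hc
  have hclen : c.length = 1 := by rw [hc]; split <;> rfl
  have hlen0 : ((List.replicate 256 ([] : List Char)).set m c).length = 256 := by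
    rw [List.length_set, List.length_replicate]
  have hget : ∀ i, ((List.replicate 256 ([] : List Char)).set m c).getD i []
      = if i = m then c else [] := by
    intro i
    by_cases hi : i = m
    · rw [if_pos hi, hi]
      exact pv_getD_set_self _ m c (by rw [List.length_replicate]; exact hm)
    · rw [if_neg hi, pv_getD_set_ne _ m i c (fun h => hi h.symm), pv_getD_rep]
  refine ⟨hlen0, le_refl 1, List.nodup_singleton m, fun i => ?_, fun i => ?_⟩
  · rw [List.mem_singleton]
    constructor
    · intro h; rw [h, hget m, if_pos rfl]; exact ⟨hm, hclen⟩
    · rintro ⟨hi, hl⟩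
      by_cases him : i = m
      · exact him
      · rw [hget i, if_neg him] at hl; simp at hl
  · rw [hget i]
    split
    · rw [hclen]
    · simp


-- ---------- phase 2: per-position piece, memoized rows/piece-rows, output assembly ----------

def pvPieceN (p c : Nat) : List Char :=
  let c1 := (pvB_row p).getD c [] ++ ['c']
  let c1 := if PySem.List.pyGet? c1 0 = some 'c'
            then PySem.List.slice c1 (some 1) none else c1
  let c2 := (pvB_row 0).getD c [] ++ ['c']
  (if c1.length ≤ c2.length then c1 else c2) ++ ['\n']

def pvPiece (pc : Char × Char) : List Char := pvPieceN pc.1.toNat pc.2.toNat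

def pvPRow (p : Nat) : List (List Char) := (List.range 256).map (pvPieceN p)

-- the two phase-2 loop bodies, named (defeq to the lambdas inside the ports)
def pvAPhase2 (out : List Char) (pc : Char × Char) : List Char :=
  let candidate1 := (((List.range 256).map pvA_row).getD pc.1.toNat []).getD pc.2.toNat [] ++ ['c']
  let candidate1 := if PySem.List.pyGet? candidate1 0 = some 'c'
                    then PySem.List.slice candidate1 (some 1) none else candidate1
  let candidate2 := (((List.range 256).map pvA_row).getD 0 []).getD pc.2.toNat [] ++ ['c']
  out ++ (PySem.List.sorted [candidate1, candidate2] (fun s => s.length) false).headD [] ++ ['\n']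

def pvBPhase2
    (st : PySem.Dict Nat (List (List Char)) × PySem.Dict Nat (List (List Char)) × List (List Char))
    (pc : Char × Char) :
    PySem.Dict Nat (List (List Char)) × PySem.Dict Nat (List (List Char)) × List (List Char) :=
  let q := pvB_prow st.1 st.2.1 pc.1.toNat
  (q.1, q.2.1, st.2.2 ++ [q.2.2.getD pc.2.toNat []])

theorem pv_sorted_pair (x y : List Char) :
    (PySem.List.sorted [x, y] (fun s => s.length) false).headD []
      = if x.length ≤ y.length then x else y := by
  rw [PySem.List.sorted_eq_foldl_insertBy]
  simp only [List.foldl_cons, List.foldl_nil]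
  by_cases h : y.length < x.length
  · simp [PySem.List.insertBy, h]
  · simp [PySem.List.insertBy, h]

def pvRinv (rows : PySem.Dict Nat (List (List Char))) : Prop :=
  ∀ k r, rows.get? k = some r → r = pvB_row k

def pvPinv (prows : PySem.Dict Nat (List (List Char))) : Prop :=
  ∀ k r, prows.get? k = some r → r = pvPRow k

theorem pv_getRow (rows : PySem.Dict Nat (List (List Char))) (src : Nat) (h : pvRinv rows) :
    (pvB_getRow rows src).2 = pvB_row src ∧ pvRinv (pvB_getRow rows src).1 := by
  rcases hg : rows.get? src with _ | r
  · have hval : pvB_getRow rows src = (rows.insert src (pvB_row src), pvB_row src) := by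
      simp [pvB_getRow, hg]
    rw [hval]
    refine ⟨rfl, fun k rr hk => ?_⟩
    by_cases hks : k = src
    · subst hks
      rw [PySem.Dict.get?_insert_self] at hk
      exact (Option.some.inj hk).symm
    · rw [PySem.Dict.get?_insert_of_ne _ _ hks] at hk
      exact h k rr hk
  · have hval : pvB_getRow rows src = (rows, r) := by simp [pvB_getRow, hg]
    rw [hval]
    exact ⟨h src r hg, h⟩

theorem pv_prowBuild (p : Nat) : pvB_prowBuild (pvB_row p) (pvB_row 0) = pvPRow p := by
  unfold pvB_prowBuild pvPRow
  rw [PySem.List.foldl_append_singleton_eq_map]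
  rw [List.nil_append]
  rfl

set_option maxRecDepth 4096 in
theorem pv_prow (rows prows : PySem.Dict Nat (List (List Char))) (p : Nat)
    (h1 : pvRinv rows) (h2 : pvPinv prows) :
    (pvB_prow rows prows p).2.2 = pvPRow p ∧
    pvRinv (pvB_prow rows prows p).1 ∧ pvPinv (pvB_prow rows prows p).2.1 := by
  rcases hg : prows.get? p with _ | r
  · obtain ⟨e1a, e1b⟩ := pv_getRow rows p h1
    obtain ⟨e0a, e0b⟩ := pv_getRow (pvB_getRow rows p).1 0 e1b
    have hb : pvB_prowBuild (pvB_getRow rows p).2 (pvB_getRow (pvB_getRow rows p).1 0).2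
        = pvPRow p := by
      rw [e1a, e0a, pv_prowBuild]
    have hval : pvB_prow rows prows p
        = ((pvB_getRow (pvB_getRow rows p).1 0).1,
           prows.insert p (pvB_prowBuild (pvB_getRow rows p).2 (pvB_getRow (pvB_getRow rows p).1 0).2),
           pvB_prowBuild (pvB_getRow rows p).2 (pvB_getRow (pvB_getRow rows p).1 0).2) := by
      simp [pvB_prow, hg]
    rw [hval]
    refine ⟨hb, e0b, fun k rr hk => ?_⟩
    by_cases hks : k = p
    · subst hks
      rw [PySem.Dict.get?_insert_self] at hk
      rw [← Option.some.inj hk, hb]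
    · rw [PySem.Dict.get?_insert_of_ne _ _ hks] at hk
      exact h2 k rr hk
  · have hval : pvB_prow rows prows p = (rows, prows, r) := by simp [pvB_prow, hg]
    rw [hval]
    exact ⟨h2 p r hg, h1, h2⟩

theorem pv_B_fold :
    ∀ (l : List (Char × Char)) (rows prows : PySem.Dict Nat (List (List Char)))
      (pieces : List (List Char)),
    pvRinv rows → pvPinv prows → (∀ pc ∈ l, pc.2.toNat < 256) →
    (l.foldl pvBPhase2 (rows, prows, pieces)).2.2 = pieces ++ l.map pvPiece := by
  intro l
  induction l with
  | nil => intro rows prows pieces _ _ _; simp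
  | cons pc l ih =>
    intro rows prows pieces h1 h2 hdom
    rw [List.foldl_cons, List.map_cons]
    obtain ⟨q1, q2, q3⟩ := pv_prow rows prows pc.1.toNat h1 h2
    have hc : pc.2.toNat < 256 := hdom pc List.mem_cons_self
    have hpiece : (pvB_prow rows prows pc.1.toNat).2.2.getD pc.2.toNat [] = pvPiece pc := by
      rw [q1]
      unfold pvPRow
      rw [PySem.List.getD_map_range (pvPieceN pc.1.toNat) 256 pc.2.toNat [] hc]
      rfl
    have hstep : pvBPhase2 (rows, prows, pieces) pc
        = ((pvB_prow rows prows pc.1.toNat).1, (pvB_prow rows prows pc.1.toNat).2.1,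
           pieces ++ [pvPiece pc]) := by
      simp only [pvBPhase2, hpiece]
    rw [hstep, ih _ _ _ q2 q3 (fun q hq => hdom q (List.mem_cons_of_mem _ hq))]
    simp

theorem pv_join_flatten : ∀ ps : List (List Char), PySem.Chars.join [] ps = ps.flatten := by
  intro ps
  induction ps with
  | nil => rw [PySem.Chars.join_nil]; rfl
  | cons p ps ih =>
    cases ps with
    | nil => rw [PySem.Chars.join_singleton]; simp
    | cons q r =>
      rw [PySem.Chars.join_cons_cons]
      simp only [List.flatten_cons] at *
      simp [ih]

theorem pv_A_fold :
    ∀ (l : List (Char × Char)) (out : List Char), (∀ pc ∈ l, pc.1.toNat < 256) →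
    l.foldl pvAPhase2 out = out ++ (l.map pvPiece).flatten := by
  intro l
  induction l with
  | nil => intro out _; simp
  | cons pc l ih =>
    intro out hdom
    rw [List.foldl_cons, List.map_cons]
    have hp : pc.1.toNat < 256 := hdom pc List.mem_cons_self
    have hm1 : ((List.range 256).map pvA_row).getD pc.1.toNat [] = pvB_row pc.1.toNat := by
      rw [PySem.List.getD_map_range pvA_row 256 pc.1.toNat [] hp, pv_row_eq _ hp]
    have hm0 : ((List.range 256).map pvA_row).getD 0 [] = pvB_row 0 := by
      rw [PySem.List.getD_map_range pvA_row 256 0 [] (by norm_num), pv_row_eq 0 (by norm_num)]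
    have hchunk : pvAPhase2 out pc = out ++ pvPiece pc := by
      simp only [pvAPhase2, pvPiece, pvPieceN, hm1, hm0, pv_sorted_pair, List.append_assoc]
    rw [hchunk, ih (out ++ pvPiece pc) (fun q hq => hdom q (List.mem_cons_of_mem _ hq))]
    simp

theorem pv_main (text : String) (h : Dom_to_Abysal text) :
    to_Abysal text = to_Abysal_alt text := by
  unfold to_Abysal to_Abysal_alt
  show String.ofList
      ((('\x00' :: text.toList).zip (text.toList ++ ['\n'])).foldl pvAPhase2 [])
    = String.ofList
      (PySem.Chars.join []
        ((('\x00' :: text.toList).zip (text.toList ++ ['\n'])).foldl pvBPhase2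
          (PySem.Dict.empty, PySem.Dict.empty, [])).2.2)
  have hdomc : ∀ c ∈ text.toList, c.toNat < 256 := by
    intro c hc
    unfold Dom_to_Abysal pvDomStr at h
    rw [List.all_eq_true] at h
    have hd := h c hc
    unfold pvDomChar at hd
    simp at hd
    omega
  have hdom1 : ∀ pc ∈ (('\x00' :: text.toList).zip (text.toList ++ ['\n'])),
      pc.1.toNat < 256 := by
    intro pc hpc
    rcases List.mem_cons.1 (List.of_mem_zip hpc).1 with h0 | hmem
    · rw [h0]; decide
    · exact hdomc pc.1 hmem
  have hdom2 : ∀ pc ∈ (('\x00' :: text.toList).zip (text.toList ++ ['\n'])),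
      pc.2.toNat < 256 := by
    intro pc hpc
    rcases List.mem_append.1 (List.of_mem_zip hpc).2 with hmem | h0
    · exact hdomc pc.2 hmem
    · rw [List.mem_singleton.1 h0]; decide
  rw [pv_A_fold _ [] hdom1,
    pv_B_fold _ PySem.Dict.empty PySem.Dict.empty []
      (fun k r hk => absurd hk (by rw [PySem.Dict.get?_empty]; simp))
      (fun k r hk => absurd hk (by rw [PySem.Dict.get?_empty]; simp))
      hdom2,
    pv_join_flatten]
  simp

-- ===== VERDICT (by name: the statement is the Claim_ definition above) =====
theorem to_Abysal_spec : Claim_equal_to_Abysal := by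
  intro text h
  exact pv_main text h
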